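-- pv_equiv track=rewrite | github.com/abhishek25dh/exp-pipeline | layout_19_step_1.py | build_min_lens
-- ===== SOURCE A (Python) =====
-- def build_min_lens(total_tokens, phrase_count):
--     min_lens = [2 for _ in range(phrase_count)]
--     min_total = sum(min_lens)
--     if total_tokens >= min_total:
--         return min_lens
--
--     deficit = min_total - total_tokens
--     order = [i for i in range(phrase_count) if i % 2 == 1] + [i for i in range(phrase_count) if i % 2 == 0]
--     it = 0
--     while deficit > 0 and it < 1000:
--         for idx in order:
--             if deficit <= 0:
--                 break
--             if min_lens[idx] > 1:
--                 min_lens[idx] -= 1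
--                 deficit -= 1
--         it += 1
--     return min_lens
-- ===== SOURCE B (Python) =====
-- def build_min_lens(total_tokens, phrase_count):
--     # closed-form: k entries become 1, odds ranked before evens
--     k = min(max(0, 2 * phrase_count - total_tokens), phrase_count)
--     num_odds = phrase_count // 2
--     return [1 if ((i - 1) // 2 if i % 2 == 1 else num_odds + i // 2) < k else 2
--             for i in range(phrase_count)]
-- ===== Notes on version B (the rewrite author's own statement) =====
-- stated objective: alternative
-- what changed: B replaces A's order-list construction and pass-by-pass 'reduce one entry at a time' while-loop with a single list comprehension that computes each index's rank in the odds-then-evens order in closed form and compares it to the clamped deficit k.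
import Mathlib
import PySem

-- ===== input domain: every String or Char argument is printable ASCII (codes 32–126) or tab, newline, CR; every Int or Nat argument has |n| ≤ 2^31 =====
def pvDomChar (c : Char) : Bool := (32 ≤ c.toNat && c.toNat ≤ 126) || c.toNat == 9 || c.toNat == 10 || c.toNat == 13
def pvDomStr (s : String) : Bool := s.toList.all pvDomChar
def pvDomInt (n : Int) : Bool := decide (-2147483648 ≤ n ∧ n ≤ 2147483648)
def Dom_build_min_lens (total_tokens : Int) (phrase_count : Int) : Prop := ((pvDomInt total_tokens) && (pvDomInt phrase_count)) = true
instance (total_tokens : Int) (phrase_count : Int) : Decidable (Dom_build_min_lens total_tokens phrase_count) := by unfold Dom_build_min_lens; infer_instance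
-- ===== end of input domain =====

-- B replaces A's pass-by-pass reduction loop with a closed-form per-index formula (each index's
-- rank in A's odds-then-evens order is computed directly and compared to the clamped deficit).


-- ===== PORT A =====

-- one step of the inner `for idx in order` body; Python's `break` when deficit <= 0 is modelled
-- as a no-op on the remaining elements (the state is unchanged either way)
def pvInnerStep (st : List Int × Int) (idx : Int) : List Int × Int :=
  if st.2 ≤ 0 then st
  else
    match PySem.List.pyGet? st.1 idx with
    | some v => if v > 1 then (st.1.set idx.toNat (v - 1), st.2 - 1) else st
    | none => st   -- unreachable: idx always in range

-- `while deficit > 0 and it < 1000:` — fuel counts the remaining iterations up to 1000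
def pvWhile (order : List Int) : Nat → List Int × Int → List Int
  | 0, st => st.1
  | n + 1, st => if st.2 > 0 then pvWhile order n (order.foldl pvInnerStep st) else st.1

def build_min_lens (total_tokens : Int) (phrase_count : Int) : List Int :=
  let min_lens := (PySem.List.pyRange 0 phrase_count 1).map (fun _ => (2 : Int))
  let min_total := min_lens.sum
  if total_tokens ≥ min_total then min_lens
  else
    let deficit := min_total - total_tokens
    let order := (PySem.List.pyRange 0 phrase_count 1).filter (fun i => PySem.Int.mod i 2 == 1)
              ++ (PySem.List.pyRange 0 phrase_count 1).filter (fun i => PySem.Int.mod i 2 == 0)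
    pvWhile order 1000 (min_lens, deficit)

-- ===== PORT B =====
def build_min_lens_alt (total_tokens : Int) (phrase_count : Int) : List Int :=
  let k := min (max 0 (2 * phrase_count - total_tokens)) phrase_count
  let numOdds := PySem.Int.floordiv phrase_count 2
  (PySem.List.pyRange 0 phrase_count 1).map (fun i =>
    let rank := if PySem.Int.mod i 2 == 1 then PySem.Int.floordiv (i - 1) 2
                else numOdds + PySem.Int.floordiv i 2
    if rank < k then (1 : Int) else 2)

-- ===== PRECONDITION & SPEC =====
def Spec_build_min_lens (total_tokens : Int) (phrase_count : Int) (out : List Int) : Prop := out = build_min_lens_alt total_tokens phrase_count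
instance (total_tokens : Int) (phrase_count : Int) (out : List Int) : Decidable (Spec_build_min_lens total_tokens phrase_count out) := by unfold Spec_build_min_lens; infer_instance

-- ===== CLAIM (what is proved, stated in full; the proofs are below) =====
def Claim_equal_build_min_lens : Prop := ∀ (total_tokens : Int) (phrase_count : Int), Dom_build_min_lens total_tokens phrase_count → Spec_build_min_lens total_tokens phrase_count (build_min_lens total_tokens phrase_count)

-- ===== LEMMAS AND PROOFS =====

-- the explicit form of A's `order` list, over Nat indices cast to Int
def pvOdds (N : Nat) : List Int := (List.range (N / 2)).map (fun t => ((2 * t + 1 : Nat) : Int))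
def pvEvens (N : Nat) : List Int := (List.range ((N + 1) / 2)).map (fun t => ((2 * t : Nat) : Int))
def pvOrd (N : Nat) : List Int := pvOdds N ++ pvEvens N

-- position of index n in the odds-then-evens order
def pvRank (N n : Nat) : Nat := if n % 2 = 1 then (n - 1) / 2 else N / 2 + n / 2

-- applying the 2→1 reductions at a list of indices
def pvApply (ml : List Int) (js : List Int) : List Int := js.foldl (fun l j => l.set j.toNat 1) ml

lemma pvWhile_succ (order : List Int) (n : Nat) (st : List Int × Int) :
    pvWhile order (n + 1) st = if st.2 > 0 then pvWhile order n (order.foldl pvInnerStep st) else st.1 := rfl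

lemma pvWhile_nil : ∀ (n : Nat) (st : List Int × Int), pvWhile [] n st = st.1 := by
  intro n
  induction n with
  | zero => intro st; rfl
  | succ m ih => intro st; rw [pvWhile_succ]; split <;> simp [List.foldl_nil, ih]

lemma pyRange_cast (N : Nat) :
    PySem.List.pyRange 0 (N : Int) 1 = (List.range N).map (fun k : Nat => (k : Int)) := by
  have h : ((N : Int) - 0).toNat = N := by omega
  rw [PySem.List.pyRange_one, h]
  exact List.map_congr_left (fun k _ => by simp)

lemma modcast_one (k : Nat) : (PySem.Int.mod (k : Int) 2 == (1 : Int)) = (k % 2 == 1) := by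
  rw [PySem.Int.mod_eq_emod_of_pos (by norm_num)]
  rcases Nat.mod_two_eq_zero_or_one k with h2 | h2
  · have h3 : ((k : Int) % 2) = 0 := by omega
    simp [h2, h3]
  · have h3 : ((k : Int) % 2) = 1 := by omega
    simp [h2, h3]

lemma modcast_zero (k : Nat) : (PySem.Int.mod (k : Int) 2 == (0 : Int)) = (k % 2 == 0) := by
  rw [PySem.Int.mod_eq_emod_of_pos (by norm_num)]
  rcases Nat.mod_two_eq_zero_or_one k with h2 | h2
  · have h3 : ((k : Int) % 2) = 0 := by omega
    simp [h2, h3]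
  · have h3 : ((k : Int) % 2) = 1 := by omega
    simp [h2, h3]

lemma filter_odd_range (N : Nat) :
    (List.range N).filter (fun k => k % 2 == 1) = (List.range (N / 2)).map (fun t => 2 * t + 1) := by
  induction N with
  | zero => simp
  | succ n ih =>
    rw [List.range_succ, List.filter_append, ih]
    by_cases h : n % 2 = 1
    · have h2 : (n + 1) / 2 = n / 2 + 1 := by omega
      have h3 : 2 * (n / 2) + 1 = n := by omega
      rw [h2, List.range_succ, List.map_append]
      simp [h, h3]
    · have h2 : (n + 1) / 2 = n / 2 := by omega
      have h3 : (n % 2 == 1) = false := by simp; omega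
      simp [h2, h3]

lemma filter_even_range (N : Nat) :
    (List.range N).filter (fun k => k % 2 == 0) = (List.range ((N + 1) / 2)).map (fun t => 2 * t) := by
  induction N with
  | zero => simp
  | succ n ih =>
    rw [List.range_succ, List.filter_append, ih]
    by_cases h : n % 2 = 0
    · have h2 : (n + 2) / 2 = (n + 1) / 2 + 1 := by omega
      have h3 : 2 * ((n + 1) / 2) = n := by omega
      rw [h2, List.range_succ, List.map_append]
      simp [h, h3]
    · have h2 : (n + 2) / 2 = (n + 1) / 2 := by omega
      have h3 : (n % 2 == 0) = false := by simp; omega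
      simp [h2, h3]

lemma order_eq (N : Nat) :
    ((PySem.List.pyRange 0 (N : Int) 1).filter (fun i => PySem.Int.mod i 2 == 1))
      ++ ((PySem.List.pyRange 0 (N : Int) 1).filter (fun i => PySem.Int.mod i 2 == 0)) = pvOrd N := by
  rw [pyRange_cast]
  rw [List.filter_map, List.filter_map]
  unfold pvOrd pvOdds pvEvens
  simp only [Function.comp_def]
  rw [List.filter_congr (fun k _ => modcast_one k), List.filter_congr (fun k _ => modcast_zero k),
      filter_odd_range, filter_even_range, List.map_map, List.map_map]
  simp [Function.comp_def]

lemma pvOrd_length (N : Nat) : (pvOrd N).length = N := by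
  unfold pvOrd pvOdds pvEvens; simp; omega

lemma pvOrd_nodup (N : Nat) : (pvOrd N).Nodup := by
  unfold pvOrd pvOdds pvEvens
  refine List.Nodup.append ?_ ?_ ?_
  · exact List.Nodup.map (fun a b h => by omega) List.nodup_range
  · exact List.Nodup.map (fun a b h => by omega) List.nodup_range
  · intro x hx hy
    simp only [List.mem_map, List.mem_range] at hx hy
    obtain ⟨t, _, ht⟩ := hx
    obtain ⟨s, _, hs⟩ := hy
    omega

lemma pvOrd_mem_bound (N : Nat) (j : Int) (hj : j ∈ pvOrd N) : 0 ≤ j ∧ j.toNat < N := by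
  unfold pvOrd pvOdds pvEvens at hj
  simp only [List.mem_append, List.mem_map, List.mem_range] at hj
  rcases hj with ⟨t, ht, rfl⟩ | ⟨t, ht, rfl⟩ <;> omega

lemma mem_take_map_range (f : Nat → Int) (r K : Nat) (x : Int) :
    x ∈ ((List.range r).map f).take K ↔ ∃ t, t < min K r ∧ f t = x := by
  rw [← List.map_take, List.take_range]
  simp [List.mem_map, List.mem_range]

lemma pvOrd_take_mem (N K n : Nat) (hn : n < N) :
    ((n : Int) ∈ (pvOrd N).take K) ↔ pvRank N n < K := by
  unfold pvOrd pvOdds pvEvens pvRank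
  rw [List.take_append, List.mem_append, mem_take_map_range, mem_take_map_range]
  simp only [List.length_map, List.length_range]
  constructor
  · rintro (⟨t, ht, hft⟩ | ⟨t, ht, hft⟩) <;> split <;> omega
  · intro h
    by_cases hodd : n % 2 = 1
    · left; exact ⟨(n - 1) / 2, by simp [hodd] at h; omega, by omega⟩
    · right; exact ⟨n / 2, by simp [hodd] at h; omega, by omega⟩

lemma pvApply_length : ∀ (js : List Int) (ml : List Int), (pvApply ml js).length = ml.length := by
  intro js
  induction js with
  | nil => intro ml; rfl
  | cons j rest ih => intro ml; simpa [pvApply] using (ih (ml.set j.toNat 1)).trans (by simp)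

lemma pvApply_getElem? : ∀ (js : List Int) (ml : List Int) (n : Nat),
    (∀ j ∈ js, 0 ≤ j ∧ j.toNat < ml.length) →
    (pvApply ml js)[n]? = if (n : Int) ∈ js then some 1 else ml[n]? := by
  intro js
  induction js with
  | nil => intro ml n _; simp [pvApply]
  | cons j rest ih =>
    intro ml n hj
    have hstep : pvApply ml (j :: rest) = pvApply (ml.set j.toNat 1) rest := rfl
    have hj0 := hj j (List.mem_cons_self ..)
    rw [hstep, ih (ml.set j.toNat 1) n (by intro j' hj'; simpa using hj j' (List.mem_cons_of_mem _ hj'))]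
    by_cases h1 : (n : Int) ∈ rest
    · simp [h1, List.mem_cons]
    · by_cases h2 : j.toNat = n
      · have hnj : (n : Int) = j := by omega
        have hn_lt : n < ml.length := h2 ▸ hj0.2
        simp [hnj, h2, hn_lt]
      · have hnj : (n : Int) ≠ j := by omega
        simp [h1, h2, hnj]

lemma foldl_nonpos : ∀ (ord : List Int) (ml : List Int) (d : Int), d ≤ 0 →
    ord.foldl pvInnerStep (ml, d) = (ml, d) := by
  intro ord
  induction ord with
  | nil => intro ml d _; rfl
  | cons j rest ih =>
    intro ml d hd
    rw [List.foldl_cons, show pvInnerStep (ml, d) j = (ml, d) by simp [pvInnerStep]; omega]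
    exact ih ml d hd

lemma pass_lemma : ∀ (ord : List Int) (ml : List Int) (d : Int), 0 ≤ d → ord.Nodup →
    (∀ j ∈ ord, 0 ≤ j ∧ j.toNat < ml.length ∧ ml[j.toNat]? = some 2) →
    ord.foldl pvInnerStep (ml, d) = (pvApply ml (ord.take d.toNat), d - min d (ord.length : Int)) := by
  intro ord
  induction ord with
  | nil =>
    intro ml d hd _ _
    simp [pvApply]
    omega
  | cons j rest ih =>
    intro ml d hd hnd hj
    have hj0 := hj j (List.mem_cons_self ..)
    rw [List.foldl_cons]
    by_cases hpos : 0 < d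
    · have hstep : pvInnerStep (ml, d) j = (ml.set j.toNat 1, d - 1) := by
        simp only [pvInnerStep]
        rw [if_neg (by simp; omega), PySem.List.pyGet?_of_nonneg ml hj0.1, hj0.2.2]
        norm_num
      have hjrest : j ∉ rest := (List.nodup_cons.mp hnd).1
      rw [hstep, ih (ml.set j.toNat 1) (d - 1) (by omega) (List.nodup_cons.mp hnd).2 ?_]
      · have htake : (j :: rest).take d.toNat = j :: rest.take (d - 1).toNat := by
          have h1 : d.toNat = ((d - 1).toNat) + 1 := by omega
          rw [h1, List.take_succ_cons]
        rw [htake]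
        have happ : pvApply ml (j :: rest.take (d - 1).toNat)
            = pvApply (ml.set j.toNat 1) (rest.take (d - 1).toNat) := rfl
        rw [happ]
        refine Prod.ext rfl ?_
        simp only [List.length_cons]
        push_cast
        omega
      · intro j' hj'
        have h' := hj j' (List.mem_cons_of_mem _ hj')
        have hne : j'.toNat ≠ j.toNat := by
          have : j' ≠ j := fun he => hjrest (he ▸ hj')
          omega
        refine ⟨h'.1, by simpa using h'.2.1, ?_⟩
        rw [List.getElem?_set]
        simp [hne.symm, h'.2.2]
    · have hd0 : d = 0 := by omega
      subst hd0
      rw [show pvInnerStep (ml, 0) j = (ml, 0) by simp [pvInnerStep], foldl_nonpos rest ml 0 le_rfl]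
      simp [pvApply]
      omega

lemma foldl_stable : ∀ (ord : List Int) (ml : List Int) (d : Int),
    (∀ j ∈ ord, 0 ≤ j ∧ (∃ v, ml[j.toNat]? = some v ∧ v ≤ 1)) →
    ord.foldl pvInnerStep (ml, d) = (ml, d) := by
  intro ord
  induction ord with
  | nil => intro ml d _; rfl
  | cons j rest ih =>
    intro ml d hj
    have hj0 := hj j (List.mem_cons_self ..)
    obtain ⟨hge, v, hv, hv1⟩ := hj0
    have hstep : pvInnerStep (ml, d) j = (ml, d) := by
      simp only [pvInnerStep]
      split
      · rfl
      · rw [PySem.List.pyGet?_of_nonneg ml hge, hv]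
        simp; omega
    rw [List.foldl_cons, hstep]
    exact ih ml d (fun j' hj' => hj j' (List.mem_cons_of_mem _ hj'))

lemma pvWhile_stable (ord : List Int) (ml : List Int)
    (h : ∀ j ∈ ord, 0 ≤ j ∧ (∃ v, ml[j.toNat]? = some v ∧ v ≤ 1)) :
    ∀ (n : Nat) (d : Int), pvWhile ord n (ml, d) = ml := by
  intro n
  induction n with
  | zero => intro d; rfl
  | succ m ih =>
    intro d
    rw [pvWhile_succ]
    split
    · rw [foldl_stable ord ml d h]; exact ih d
    · rfl

lemma rank_eq (N k : Nat) :
    (if PySem.Int.mod (k : Int) 2 == 1 then PySem.Int.floordiv ((k : Int) - 1) 2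
     else PySem.Int.floordiv (N : Int) 2 + PySem.Int.floordiv (k : Int) 2) = ((pvRank N k : Nat) : Int) := by
  rw [modcast_one]
  unfold pvRank
  by_cases h : k % 2 = 1
  · rw [if_pos (by simp [h]), if_pos h]
    rw [show ((k : Int) - 1) = ((k - 1 : Nat) : Int) by omega,
        PySem.Int.floordiv_eq_ediv_of_pos (by norm_num)]
    omega
  · rw [if_neg (by simp [h]), if_neg h,
        PySem.Int.floordiv_eq_ediv_of_pos (show (0:Int) < 2 by norm_num),
        PySem.Int.floordiv_eq_ediv_of_pos (show (0:Int) < 2 by norm_num)]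
    push_cast
    omega

lemma pvRank_lt (N n : Nat) (hn : n < N) : pvRank N n < N := by
  unfold pvRank; split <;> omega

lemma main_eq (tt pc : Int) : build_min_lens tt pc = build_min_lens_alt tt pc := by
  by_cases hpc : pc ≤ 0
  · have hR : PySem.List.pyRange 0 pc 1 = [] := PySem.List.pyRange_one_eq_nil (by omega)
    simp only [build_min_lens, build_min_lens_alt, hR, List.map_nil, List.sum_nil,
      List.filter_nil, List.append_nil]
    split
    · rfl
    · exact pvWhile_nil 1000 _
  · lift pc to Nat using (by omega : (0:Int) ≤ pc) with N
    have hN : 0 < N := by omega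
    have hR := pyRange_cast N
    have hml0 : ((PySem.List.pyRange 0 (N:Int) 1).map (fun _ => (2:Int))) = List.replicate N 2 := by
      rw [hR, List.map_map]
      simp [Function.comp_def, List.map_const']
    have hsum : (List.replicate N (2:Int)).sum = 2 * (N:Int) := by
      simp [List.sum_replicate]
      ring
    simp only [build_min_lens, build_min_lens_alt, hml0, hsum]
    by_cases htt : tt ≥ 2 * (N:Int)
    · rw [if_pos htt]
      have hk : min (max 0 (2 * (N:Int) - tt)) (N:Int) = 0 := by omega
      rw [hk, hR, List.map_map]
      symm
      rw [List.eq_replicate_iff]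
      refine ⟨by simp, ?_⟩
      intro x hx
      simp only [List.mem_map, List.mem_range] at hx
      obtain ⟨k, hk2, rfl⟩ := hx
      simp only [Function.comp_apply]
      rw [rank_eq]
      rw [if_neg (by omega)]
    · rw [if_neg htt, order_eq]
      set d0 : Int := 2 * (N:Int) - tt with hd0
      have hd0pos : 0 < d0 := by omega
      set ML1 : List Int := pvApply (List.replicate N 2) ((pvOrd N).take d0.toNat) with hML1
      have hbounds : ∀ j ∈ pvOrd N, 0 ≤ j ∧ j.toNat < (List.replicate N (2:Int)).length ∧
          (List.replicate N (2:Int))[j.toNat]? = some 2 := by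
        intro j hj
        obtain ⟨h1, h2⟩ := pvOrd_mem_bound N j hj
        exact ⟨h1, by simpa using h2, by simp [List.getElem?_replicate]; omega⟩
      have hpass : (pvOrd N).foldl pvInnerStep (List.replicate N 2, d0)
          = (ML1, d0 - min d0 (N:Int)) := by
        rw [pass_lemma (pvOrd N) (List.replicate N 2) d0 (by omega) (pvOrd_nodup N) hbounds]
        rw [pvOrd_length]
      have htakebounds : ∀ j ∈ (pvOrd N).take d0.toNat, 0 ≤ j ∧ j.toNat < (List.replicate N (2:Int)).length := by
        intro j hj
        obtain ⟨h1, h2⟩ := pvOrd_mem_bound N j (List.mem_of_mem_take hj)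
        exact ⟨h1, by simpa using h2⟩
      have hML1get : ∀ n : Nat, n < N →
          ML1[n]? = if pvRank N n < d0.toNat then some 1 else some 2 := by
        intro n hn
        rw [hML1, pvApply_getElem? _ _ n htakebounds]
        simp only [pvOrd_take_mem N d0.toNat n hn]
        split <;> simp [hn]
      have hA : pvWhile (pvOrd N) 1000 (List.replicate N 2, d0) = ML1 := by
        rw [show (1000 : Nat) = 999 + 1 from rfl, pvWhile_succ, if_pos (by simpa using hd0pos), hpass]
        by_cases hle : d0 ≤ (N:Int)
        · have hz : d0 - min d0 (N:Int) = 0 := by omega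
          rw [hz, show (999 : Nat) = 998 + 1 from rfl, pvWhile_succ, if_neg (by norm_num)]
        · apply pvWhile_stable
          intro j hj
          obtain ⟨h1, h2⟩ := pvOrd_mem_bound N j hj
          refine ⟨h1, 1, ?_, le_rfl⟩
          rw [hML1get j.toNat h2, if_pos ?_]
          have := pvRank_lt N j.toNat h2
          omega
      rw [hA]
      have hk : min (max 0 d0) (N:Int) = min d0 (N:Int) := by omega
      rw [hk]
      apply List.ext_getElem?
      intro n
      by_cases hn : n < N
      · rw [hML1get n hn, hR, List.map_map]
        rw [List.getElem?_map, List.getElem?_range hn]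
        simp only [Option.map_some, Function.comp_apply]
        rw [rank_eq]
        have hrk := pvRank_lt N n hn
        by_cases hc : pvRank N n < d0.toNat
        · rw [if_pos hc, if_pos (by omega)]
        · rw [if_neg hc, if_neg (by omega)]
      · have hl1 : ML1.length = N := by rw [hML1, pvApply_length]; simp
        rw [List.getElem?_eq_none (by omega), List.getElem?_eq_none (by rw [hR]; simp; omega)]

-- ===== VERDICT (by name: the statement is the Claim_ definition above) =====
theorem build_min_lens_spec : Claim_equal_build_min_lens := by
  intro tt pc _
  exact main_eq tt pc
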